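-- pv_equiv track=rewrite | github.com/miliar/Code_Jam_Webscraper | Solutions_python/Problem_155/896.py | getNfriends
-- ===== SOURCE A (Python) =====
-- def getNfriends(maxShy, shy):
--     nFriends= 0
--     nStanding= 0
--     for iLevel, nSitting in zip(range(maxShy + 1), shy):
--         nNewFriends= max(0, iLevel - nStanding)
--         nFriends += nNewFriends
--         nStanding += nSitting + nNewFriends
--     return nFriends
-- ===== SOURCE B (Python) =====
-- def getNfriends(maxShy, shy):
--     levels = shy[:maxShy + 1] if maxShy >= 0 else []
--     prefixes = []
--     total = 0
--     for x in levels: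
--         prefixes.append(total)
--         total += x
--     return max((i - p for i, p in enumerate(prefixes)), default=0)
-- ===== Notes on version B (the rewrite author's own statement) =====
-- stated objective: alternative
-- what changed: B drops A's feedback simulation (friends fed back into the standing count) and instead works in stages: slice the relevant shyness levels, build the plain prefix-sum list, and return the maximum deficit i - prefix_i over an enumerate, with default 0.
import Mathlib
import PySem

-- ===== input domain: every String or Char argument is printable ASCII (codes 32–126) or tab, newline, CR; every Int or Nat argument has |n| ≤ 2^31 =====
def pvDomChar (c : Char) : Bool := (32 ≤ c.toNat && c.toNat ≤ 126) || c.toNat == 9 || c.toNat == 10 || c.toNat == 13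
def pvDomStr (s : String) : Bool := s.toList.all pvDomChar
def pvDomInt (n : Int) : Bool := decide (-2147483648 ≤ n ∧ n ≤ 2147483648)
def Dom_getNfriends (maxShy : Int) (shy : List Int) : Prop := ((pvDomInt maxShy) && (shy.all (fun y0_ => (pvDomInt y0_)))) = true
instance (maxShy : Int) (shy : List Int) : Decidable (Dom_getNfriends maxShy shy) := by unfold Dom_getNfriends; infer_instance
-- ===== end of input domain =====

-- B replaces A's feedback simulation (friends fed back into the standing count) by a staged
-- computation: slice the relevant levels, build the prefix-sum list, take the maximum deficit
-- i - prefix_i (default 0). Objective: alternative (same O(n) cost, different structure).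

-- ===== PORT A =====
-- literal port of A: fold over zip(range(maxShy+1), shy) with state (nFriends, nStanding);
-- Python's zip is lazy, so only the first min(maxShy+1, len(shy)) indices of the range are
-- ever produced — the port generates exactly those (pvZip_trunc below proves the bound equal)
def getNfriends (maxShy : Int) (shy : List Int) : Int :=
  (((PySem.List.pyRange 0 (min (maxShy + 1) (shy.length : Int)) 1).zip shy).foldl
    (fun (st : Int × Int) p =>
      let nNewFriends := max 0 (p.1 - st.2)
      (st.1 + nNewFriends, st.2 + p.2 + nNewFriends)) (0, 0)).1

-- ===== PORT B =====
-- literal port of B: levels = shy[:maxShy+1] (empty if maxShy < 0); append-loop building the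
-- prefix list; max over enumerate with default 0
def getNfriends_alt (maxShy : Int) (shy : List Int) : Int :=
  let levels : List Int :=
    if 0 ≤ maxShy then PySem.List.slice shy none (some (maxShy + 1)) else []
  let prefixes :=
    (levels.foldl (fun (st : List Int × Int) x => (st.1 ++ [st.2], st.2 + x)) ([], 0)).1
  PySem.List.maxD ((PySem.List.enumerate prefixes).map (fun q => q.1 - q.2)) (fun y => y) 0

-- ===== PRECONDITION & SPEC =====
def Spec_getNfriends (maxShy : Int) (shy : List Int) (out : Int) : Prop := out = getNfriends_alt maxShy shy
instance (maxShy : Int) (shy : List Int) (out : Int) : Decidable (Spec_getNfriends maxShy shy out) := by unfold Spec_getNfriends; infer_instance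

-- ===== CLAIM (what is proved, stated in full; the proofs are below) =====
def Claim_equal_getNfriends : Prop := ∀ (maxShy : Int) (shy : List Int), Dom_getNfriends maxShy shy → Spec_getNfriends maxShy shy (getNfriends maxShy shy)

-- ===== LEMMAS AND PROOFS =====

-- Reference function both ports are reduced to: the maximum (clamped at 0 via the base case)
-- of the deficits i - prefix over levels i = i0, i0+1, … while i ≤ m.
def pvDgo (m : Int) : Int → Int → List Int → Int
  | _, _, [] => 0
  | i, p, x :: t => if m < i then 0 else max (i - p) (pvDgo m (i + 1) (p + x) t)

-- A's fold starting from friends f ≥ 0 and standing s computes max f (pvDgo m i (s - f) t):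
-- the prefix of the sitting counts is s - f, and f + max 0 (i - s) = max f (i - (s - f)).
theorem pvA_fold (m : Int) (t : List Int) : ∀ (i f s : Int), 0 ≤ f →
    (((PySem.List.pyRange i (m + 1) 1).zip t).foldl
      (fun (st : Int × Int) p =>
        let nNewFriends := max 0 (p.1 - st.2)
        (st.1 + nNewFriends, st.2 + p.2 + nNewFriends)) (f, s)).1
      = max f (pvDgo m i (s - f) t) := by
  induction t with
  | nil =>
    intro i f s hf
    simp [pvDgo]
    omega
  | cons x t ih =>
    intro i f s hf
    by_cases hi : m < i
    · rw [PySem.List.pyRange_one_eq_nil (by omega)]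
      simp [pvDgo, hi]
      omega
    · rw [PySem.List.pyRange_one_cons (by omega)]
      simp only [List.zip_cons_cons, List.foldl_cons]
      have := ih (i + 1) (f + max 0 (i - s)) (s + x + max 0 (i - s))
        (by omega)
      simp only [pvDgo, if_neg hi]
      rw [show s + x + max 0 (i - s) - (f + max 0 (i - s)) = s - f + x by ring] at this
      rw [this]
      omega

-- The prefix-building loop of B, from any accumulator, appends pvPrefixes total levels.
def pvPrefixes : Int → List Int → List Int
  | _, [] => []
  | p, x :: t => p :: pvPrefixes (p + x) t

theorem pvPrefix_fold (t : List Int) : ∀ (acc : List Int) (p : Int),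
    (t.foldl (fun (st : List Int × Int) x => (st.1 ++ [st.2], st.2 + x)) (acc, p)).1
      = acc ++ pvPrefixes p t := by
  induction t with
  | nil => intro acc p; simp [pvPrefixes]
  | cons x t ih =>
    intro acc p
    simp only [List.foldl_cons, pvPrefixes]
    rw [ih]
    simp

-- The deficits of the enumerated prefixes, folded with max from base b, give pvDgo when the
-- level list is cut at m (i ≤ m + 1 keeps the cut length in sync).
theorem pvDgo_eq_foldr (m : Int) (t : List Int) : ∀ (i p : Int), 0 ≤ i → i ≤ m + 1 →
    pvDgo m i p t =
      (((PySem.List.enumerate (pvPrefixes p (t.take (m + 1 - i).toNat)) i).map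
        (fun q => q.1 - q.2)).foldr max 0) := by
  induction t with
  | nil => intro i p _ _; simp [pvDgo, pvPrefixes]
  | cons x t ih =>
    intro i p h0 h1
    by_cases hi : m < i
    · have : (m + 1 - i).toNat = 0 := by omega
      simp [pvDgo, hi, this, pvPrefixes]
    · have hlen : (m + 1 - i).toNat = (m + 1 - (i + 1)).toNat + 1 := by omega
      rw [hlen]
      simp only [List.take_succ_cons, pvPrefixes, PySem.List.enumerate_cons,
        List.map_cons, List.foldr_cons, pvDgo, if_neg hi]
      rw [ih (i + 1) (p + x) (by omega) (by omega)]

theorem pvFoldl_max_init (t : List Int) : ∀ (a b : Int),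
    t.foldl max (max a b) = max a (t.foldl max b) := by
  induction t with
  | nil => intro a b; rfl
  | cons x t ih =>
    intro a b
    simp only [List.foldl_cons, max_assoc]
    exact ih a (max b x)

theorem pvMaxD_cons (x : Int) (t : List Int) (hx : 0 ≤ x) :
    max 0 (max x (t.foldr max 0)) = PySem.List.maxD (x :: t) (fun y => y) 0 := by
  simp only [PySem.List.maxD, PySem.List.max?_id_cons, Option.getD_some]
  have h1 := (PySem.List.le_foldl_max t x).1
  have h2 : List.foldl max (max 0 x) t = max 0 (t.foldl max x) := pvFoldl_max_init t 0 x
  have h3 : List.foldl max 0 (x :: t) = List.foldr max 0 (x :: t) :=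
    List.foldl_eq_foldr 0 (x :: t)
  simp only [List.foldl_cons, List.foldr_cons] at h3
  omega

-- zip truncates at the shorter list, so the range bound may be cut at a + len t.
theorem pvZip_trunc (b : Int) (t : List Int) : ∀ (a : Int),
    ((PySem.List.pyRange a (min b (a + (t.length : Int))) 1).zip t)
      = (PySem.List.pyRange a b 1).zip t := by
  induction t with
  | nil => intro a; simp
  | cons x t ih =>
    intro a
    by_cases hb : a < b
    · rw [PySem.List.pyRange_one_cons (by simp; omega), PySem.List.pyRange_one_cons hb]
      simp only [List.zip_cons_cons]
      have h := ih (a + 1)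
      rw [show a + 1 + (t.length : Int) = a + ((x :: t).length : Int) by simp; ring] at h
      rw [h]
    · rw [PySem.List.pyRange_one_eq_nil (by omega), PySem.List.pyRange_one_eq_nil (by omega)]

-- ===== VERDICT (by name: the statement is the Claim_ definition above) =====
theorem getNfriends_spec : Claim_equal_getNfriends := by
  intro maxShy shy _
  unfold Spec_getNfriends getNfriends getNfriends_alt
  have hz := pvZip_trunc (maxShy + 1) shy 0
  rw [show (0:Int) + (shy.length : Int) = (shy.length : Int) by ring] at hz
  rw [hz]
  rw [pvA_fold maxShy shy 0 0 0 le_rfl]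
  by_cases hm : 0 ≤ maxShy
  · simp only [if_pos hm]
    rw [PySem.List.slice_to shy (by omega : (0:Int) ≤ maxShy + 1)]
    rw [pvPrefix_fold]
    simp only [List.nil_append]
    have h := pvDgo_eq_foldr maxShy shy 0 0 le_rfl (by omega)
    rw [show maxShy + 1 - 0 = maxShy + 1 by ring] at h
    rw [show (0:Int) - 0 = 0 by ring, h]
    cases List.take (maxShy + 1).toNat shy with
    | nil => simp [pvPrefixes, PySem.List.maxD, PySem.List.max?]
    | cons y ys =>
      simp only [pvPrefixes, PySem.List.enumerate_cons, List.map_cons, List.foldr_cons,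
        (by ring : (0:Int) - 0 = 0)]
      exact pvMaxD_cons 0 _ le_rfl
  · simp only [if_neg hm]
    cases shy with
    | nil => simp [pvDgo, PySem.List.maxD, PySem.List.max?]
    | cons x t =>
      simp [pvDgo, (by omega : maxShy < 0), PySem.List.maxD, PySem.List.max?]
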